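-- pv_equiv track=rewrite | github.com/Dassinet/Gpt-python | rag.py | _find_matching_mcp_server
-- ===== SOURCE A (Python) =====
-- from typing import List, Dict, Any, Optional, AsyncGenerator, Union
-- from typing import List, Tuple
--
-- def _find_matching_mcp_server(referenced_server: str, available_servers: List[str]) -> Optional[str]:
--     """Find the best matching MCP server from the referenced name."""
--     if not referenced_server or not available_servers:
--         return None
--
--     # Direct match - highest priority
--     if referenced_server in available_servers:
--         return referenced_server
--
--     # Case-insensitive match
--     for server in available_servers:
--         if server.lower() == referenced_server.lower():
--             return server
--
--     # Fuzzy match - check if any available server contains the referenced name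
--     for server in available_servers:
--         if referenced_server.lower() in server.lower() or server.lower() in referenced_server.lower():
--             return server
--
--     # No match found
--     return None
-- ===== SOURCE B (Python) =====
-- from typing import List, Optional
--
-- def _find_matching_mcp_server(referenced_server: str, available_servers: List[str]) -> Optional[str]:
--     """Single pass: exact match returns immediately; first case-insensitive and
--     first fuzzy (substring either direction) matches are recorded for fallback."""
--     if not referenced_server or not available_servers:
--         return None
--     ref_l = referenced_server.lower()
--     ci_match = None
--     fuzzy_match = None
--     for server in available_servers:
--         if server == referenced_server:
--             return referenced_server
--         server_l = server.lower()
--         if ci_match is None and server_l == ref_l: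
--             ci_match = server
--         if fuzzy_match is None and (ref_l in server_l or server_l in ref_l):
--             fuzzy_match = server
--     return ci_match if ci_match is not None else fuzzy_match
-- ===== Notes on version B (the rewrite author's own statement) =====
-- stated objective: faster
-- what changed: Replaces A's membership test plus two sequential full scans (each recomputing lowercase strings) with one loop that early-returns on exact match and records only the first case-insensitive and first fuzzy match, lowering each server once.
import Mathlib
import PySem

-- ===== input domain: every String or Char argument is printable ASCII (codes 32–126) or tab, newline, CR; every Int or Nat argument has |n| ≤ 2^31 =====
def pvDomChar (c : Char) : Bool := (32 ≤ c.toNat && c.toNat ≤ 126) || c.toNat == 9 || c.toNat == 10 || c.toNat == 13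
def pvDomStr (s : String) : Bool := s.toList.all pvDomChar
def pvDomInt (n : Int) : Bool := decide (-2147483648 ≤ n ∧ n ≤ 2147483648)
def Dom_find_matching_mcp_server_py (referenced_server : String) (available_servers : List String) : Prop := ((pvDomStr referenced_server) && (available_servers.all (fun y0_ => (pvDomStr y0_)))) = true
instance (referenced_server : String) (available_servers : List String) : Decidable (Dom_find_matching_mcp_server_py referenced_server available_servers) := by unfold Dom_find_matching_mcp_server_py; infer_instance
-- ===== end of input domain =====

-- B replaces A's three sequential scans with one early-returning pass recording first CI/fuzzy matches (objective: faster, measured).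
-- ===== PORT A =====
-- A: guard, then exact membership, then a case-insensitive scan, then a fuzzy scan.
def aCIScan (referenced_server : String) : List String → Option String
  | [] => none
  | server :: rest =>
    if PySem.Str.lower server == PySem.Str.lower referenced_server then some server
    else aCIScan referenced_server rest

def aFuzzyScan (referenced_server : String) : List String → Option String
  | [] => none
  | server :: rest =>
    if PySem.Str.isIn (PySem.Str.lower referenced_server) (PySem.Str.lower server)
       || PySem.Str.isIn (PySem.Str.lower server) (PySem.Str.lower referenced_server) then some server
    else aFuzzyScan referenced_server rest

def find_matching_mcp_server_py (referenced_server : String) (available_servers : List String) : Option String :=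
  if referenced_server = "" ∨ available_servers = [] then none
  else if referenced_server ∈ available_servers then some referenced_server
  else
    match aCIScan referenced_server available_servers with
    | some server => some server
    | none => aFuzzyScan referenced_server available_servers

-- ===== PORT B =====
-- B: one pass; exact match returns at once, first CI and first fuzzy matches recorded.
def bLoop (referenced_server ref_l : String) (ci fz : Option String) : List String → Option String
  | [] => if ci.isSome then ci else fz
  | server :: rest =>
    if server == referenced_server then some referenced_server
    else
      let server_l := PySem.Str.lower server
      let ci' := if ci.isNone && (server_l == ref_l) then some server else ci
      let fz' := if fz.isNone && (PySem.Str.isIn ref_l server_l || PySem.Str.isIn server_l ref_l)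
                 then some server else fz
      bLoop referenced_server ref_l ci' fz' rest

def find_matching_mcp_server_py_alt (referenced_server : String) (available_servers : List String) : Option String :=
  if referenced_server = "" ∨ available_servers = [] then none
  else bLoop referenced_server (PySem.Str.lower referenced_server) none none available_servers

-- ===== PRECONDITION & SPEC =====
def Spec_find_matching_mcp_server_py (referenced_server : String) (available_servers : List String) (out : Option String) : Prop := out = find_matching_mcp_server_py_alt referenced_server available_servers
instance (referenced_server : String) (available_servers : List String) (out : Option String) : Decidable (Spec_find_matching_mcp_server_py referenced_server available_servers out) := by unfold Spec_find_matching_mcp_server_py; infer_instance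

-- ===== CLAIM =====
def Claim_equal_find_matching_mcp_server_py : Prop := ∀ (referenced_server : String) (available_servers : List String), Dom_find_matching_mcp_server_py referenced_server available_servers → Spec_find_matching_mcp_server_py referenced_server available_servers (find_matching_mcp_server_py referenced_server available_servers)

-- ===== LEMMAS AND PROOFS =====

theorem bLoop_of_mem (r rl : String) (ci fz : Option String) (l : List String)
    (h : r ∈ l) : bLoop r rl ci fz l = some r := by
  induction l generalizing ci fz with
  | nil => cases h
  | cons s rest ih =>
    simp only [bLoop]
    by_cases hs : s == r
    · simp [hs]
    · have : r ∈ rest := by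
        rcases List.mem_cons.mp h with h1 | h1
        · exact absurd (beq_iff_eq.mpr h1.symm) hs
        · exact h1
      simp [hs, ih _ _ this]

theorem bLoop_of_not_mem (r : String) (ci fz : Option String) (l : List String)
    (h : r ∉ l) :
    bLoop r (PySem.Str.lower r) ci fz l =
      (ci.or (aCIScan r l)).or (fz.or (aFuzzyScan r l)) := by
  induction l generalizing ci fz with
  | nil =>
    cases ci <;> cases fz <;> simp [bLoop, Option.or, aCIScan, aFuzzyScan]
  | cons s rest ih =>
    have hs : (s == r) = false := by
      simp only [beq_eq_false_iff_ne]
      intro hsr; exact h (hsr ▸ List.mem_cons_self ..)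
    have hrest : r ∉ rest := fun hm => h (List.mem_cons_of_mem _ hm)
    simp only [bLoop, hs, Bool.false_eq_true, if_false]
    rw [ih _ _ hrest]
    simp only [aCIScan, aFuzzyScan]
    cases ci <;> cases fz <;>
      simp [Option.or] <;> split_ifs <;> simp_all [Option.or]

theorem find_matching_eq (referenced_server : String) (available_servers : List String) :
    find_matching_mcp_server_py referenced_server available_servers =
    find_matching_mcp_server_py_alt referenced_server available_servers := by
  unfold find_matching_mcp_server_py find_matching_mcp_server_py_alt
  by_cases hg : referenced_server = "" ∨ available_servers = []
  · simp [hg]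
  · simp only [hg, if_false]
    by_cases hm : referenced_server ∈ available_servers
    · rw [bLoop_of_mem _ _ _ _ _ hm]
      simp [hm]
    · rw [bLoop_of_not_mem _ _ _ _ hm]
      simp only [hm, if_false]
      cases hc : aCIScan referenced_server available_servers <;> simp [Option.or]

-- ===== VERDICT =====
theorem find_matching_mcp_server_py_spec : Claim_equal_find_matching_mcp_server_py := by
  intro r avail _
  exact find_matching_eq r avail
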